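-- pv_equiv track=rewrite | github.com/chizmodiy/flutter-marketplace | scripts/import_vehicle_data.py | generate_sql
-- ===== SOURCE A (Python) =====
-- def generate_sql(rows: list[tuple[int, str, str, str]]) -> str:
--     makes = sorted(set(r[1] for r in rows))
--     models_set = set((r[1], r[2]) for r in rows)
--     models = sorted(models_set, key=lambda x: (x[0], x[1]))
--     styles_set = set((r[1], r[2], r[3]) for r in rows)
--     styles = sorted(styles_set, key=lambda x: (x[0], x[1], x[2]))
--
--     lines = [
--         "UPDATE public.listings SET make_id = NULL, model_id = NULL, style_id = NULL, model_year_id = NULL WHERE make_id IS NOT NULL OR model_id IS NOT NULL OR style_id IS NOT NULL OR model_year_id IS NOT NULL;",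
--         "TRUNCATE public.model_years, public.styles, public.models, public.makes;",
--         "",
--         "INSERT INTO public.makes (name) VALUES",
--     ]
--     make_vals = [f"  ('{m.replace(chr(39), chr(39)+chr(39))}')" for m in makes]
--     lines.append(",\n".join(make_vals) + " ON CONFLICT (name) DO NOTHING;")
--     lines.append("")
--
--     lines.append("INSERT INTO public.models (make_id, name)")
--     lines.append("SELECT m.id, v.name FROM (VALUES")
--     model_vals = [f"  ('{maker.replace(chr(39), chr(39)+chr(39))}', '{model.replace(chr(39), chr(39)+chr(39))}')" for maker, model in models]
--     lines.append(",\n".join(model_vals))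
--     lines.append(") AS v(maker_name, name)")
--     lines.append("JOIN makes m ON m.name = v.maker_name")
--     lines.append("ON CONFLICT (name, make_id) DO NOTHING;")
--     lines.append("")
--
--     lines.append("INSERT INTO public.styles (model_id, style_name)")
--     lines.append("SELECT mo.id, v.style_name FROM (VALUES")
--     style_vals = [f"  ('{m.replace(chr(39), chr(39)+chr(39))}', '{mo.replace(chr(39), chr(39)+chr(39))}', '{s.replace(chr(39), chr(39)+chr(39))}')" for m, mo, s in styles]
--     lines.append(",\n".join(style_vals))
--     lines.append(") AS v(maker_name, model_name, style_name)")
--     lines.append("JOIN makes ma ON ma.name = v.maker_name")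
--     lines.append("JOIN models mo ON mo.make_id = ma.id AND mo.name = v.model_name")
--     lines.append("ON CONFLICT (style_name, model_id) DO NOTHING;")
--     lines.append("")
--
--     lines.append("INSERT INTO public.model_years (style_id, year)")
--     lines.append("SELECT st.id, v.year FROM (VALUES")
--     year_vals = [f"  ('{m.replace(chr(39), chr(39)+chr(39))}', '{mo.replace(chr(39), chr(39)+chr(39))}', '{s.replace(chr(39), chr(39)+chr(39))}', {y})" for y, m, mo, s in rows]
--     lines.append(",\n".join(year_vals))
--     lines.append(") AS v(maker_name, model_name, style_name, year)")
--     lines.append("JOIN makes ma ON ma.name = v.maker_name")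
--     lines.append("JOIN models mo ON mo.make_id = ma.id AND mo.name = v.model_name")
--     lines.append("JOIN styles st ON st.model_id = mo.id AND st.style_name = v.style_name")
--     lines.append("ON CONFLICT (year, style_id) DO NOTHING;")
--
--     return "\n".join(lines)
-- ===== SOURCE B (Python) =====
-- def _q(s):
--     return "'" + s.replace("'", "''") + "'"
--
--
-- def _row(parts):
--     return "  (" + ", ".join(parts) + ")"
--
--
-- def generate_sql(rows: list[tuple[int, str, str, str]]) -> str:
--     # Sort the multiset of (make, model, style) triples once, then derive all
--     # three deduplicated levels in a single linear scan with adjacent-dedup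
--     # against the previous triple (sort-then-scan instead of set-then-sort).
--     triples = sorted((m, mo, s) for _y, m, mo, s in rows)
--     makes, models, styles = [], [], []
--     prev = None
--     for t in triples:
--         if t != prev:
--             styles.append(t)
--             if prev is None or t[:2] != prev[:2]:
--                 models.append(t[:2])
--             if prev is None or t[0] != prev[0]:
--                 makes.append(t[0])
--             prev = t
--     prologue = [
--         "UPDATE public.listings SET make_id = NULL, model_id = NULL, style_id = NULL, model_year_id = NULL WHERE make_id IS NOT NULL OR model_id IS NOT NULL OR style_id IS NOT NULL OR model_year_id IS NOT NULL;",
--         "TRUNCATE public.model_years, public.styles, public.models, public.makes;",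
--         "",
--     ]
--     makes_block = [
--         "INSERT INTO public.makes (name) VALUES",
--         ",\n".join(_row([_q(m)]) for m in makes) + " ON CONFLICT (name) DO NOTHING;",
--         "",
--     ]
--     models_block = [
--         "INSERT INTO public.models (make_id, name)",
--         "SELECT m.id, v.name FROM (VALUES",
--         ",\n".join(_row([_q(m), _q(mo)]) for m, mo in models),
--         ") AS v(maker_name, name)",
--         "JOIN makes m ON m.name = v.maker_name",
--         "ON CONFLICT (name, make_id) DO NOTHING;",
--         "",
--     ]
--     styles_block = [
--         "INSERT INTO public.styles (model_id, style_name)",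
--         "SELECT mo.id, v.style_name FROM (VALUES",
--         ",\n".join(_row([_q(m), _q(mo), _q(s)]) for m, mo, s in styles),
--         ") AS v(maker_name, model_name, style_name)",
--         "JOIN makes ma ON ma.name = v.maker_name",
--         "JOIN models mo ON mo.make_id = ma.id AND mo.name = v.model_name",
--         "ON CONFLICT (style_name, model_id) DO NOTHING;",
--         "",
--     ]
--     years_block = [
--         "INSERT INTO public.model_years (style_id, year)",
--         "SELECT st.id, v.year FROM (VALUES",
--         ",\n".join(_row([_q(m), _q(mo), _q(s), str(y)]) for y, m, mo, s in rows),
--         ") AS v(maker_name, model_name, style_name, year)",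
--         "JOIN makes ma ON ma.name = v.maker_name",
--         "JOIN models mo ON mo.make_id = ma.id AND mo.name = v.model_name",
--         "JOIN styles st ON st.model_id = mo.id AND st.style_name = v.style_name",
--         "ON CONFLICT (year, style_id) DO NOTHING;",
--     ]
--     return "\n".join(prologue + makes_block + models_block + styles_block + years_block)
-- ===== Notes on version B (the rewrite author's own statement) =====
-- stated objective: alternative
-- what changed: B sorts the multiset of (make,model,style) triples once and derives all three deduplicated levels (styles, models, makes) in one linear scan with adjacent-dedup against the previous triple, instead of A's building three separate sets and sorting each; SQL text is assembled from per-table block lists with shared quote/row helpers.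
import Mathlib
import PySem

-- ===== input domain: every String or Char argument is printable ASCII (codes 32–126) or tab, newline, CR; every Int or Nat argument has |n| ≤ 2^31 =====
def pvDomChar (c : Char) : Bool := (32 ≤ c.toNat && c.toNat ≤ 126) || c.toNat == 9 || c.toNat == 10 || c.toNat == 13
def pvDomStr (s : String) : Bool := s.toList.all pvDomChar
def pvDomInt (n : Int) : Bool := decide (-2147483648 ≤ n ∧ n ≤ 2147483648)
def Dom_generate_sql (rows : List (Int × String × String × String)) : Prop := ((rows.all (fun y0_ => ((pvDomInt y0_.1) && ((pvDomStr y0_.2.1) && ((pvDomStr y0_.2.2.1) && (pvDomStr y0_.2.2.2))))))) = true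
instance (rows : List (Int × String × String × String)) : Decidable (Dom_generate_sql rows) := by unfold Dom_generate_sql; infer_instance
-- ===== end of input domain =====

-- B sorts the multiset of (make, model, style) triples once and derives all three deduplicated
-- levels in ONE linear scan with adjacent-dedup against the previous triple, instead of A's three
-- separate set-then-sort passes (objective: alternative algorithm; return value only).

-- shared helper: Python's sorted() with a 3-tuple key, ported by hand as PySem.List.sorted with a
-- lexicographic key (exact: Python compares tuples lexicographically and strings by code points)
def pvKey3 (t : String × String × String) : String ×ₗ (String ×ₗ String) :=
  toLex (t.1, toLex (t.2.1, t.2.2))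

def pySorted3 (xs : List (String × String × String)) : List (String × String × String) :=
  PySem.List.sorted xs pvKey3

-- ===== PORT A =====
def generate_sql (rows : List (Int × String × String × String)) : String :=
  let makes := PySem.List.sorted (PySem.Set.ofList (rows.map (fun r => r.2.1))) (fun x => x)
  let models_set := PySem.Set.ofList (rows.map (fun r => (r.2.1, r.2.2.1)))
  let models := PySem.List.sorted2 models_set (fun x => x.1) (fun x => x.2)
  let styles_set := PySem.Set.ofList (rows.map (fun r => (r.2.1, r.2.2.1, r.2.2.2)))
  let styles := pySorted3 styles_set
  let lines : List String := [
    "UPDATE public.listings SET make_id = NULL, model_id = NULL, style_id = NULL, model_year_id = NULL WHERE make_id IS NOT NULL OR model_id IS NOT NULL OR style_id IS NOT NULL OR model_year_id IS NOT NULL;",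
    "TRUNCATE public.model_years, public.styles, public.models, public.makes;",
    "",
    "INSERT INTO public.makes (name) VALUES"]
  let make_vals := makes.map (fun m => "  ('" ++ PySem.Str.replace m "'" "''" ++ "')")
  let lines := lines ++ [PySem.Str.join ",\n" make_vals ++ " ON CONFLICT (name) DO NOTHING;"]
  let lines := lines ++ [""]
  let lines := lines ++ ["INSERT INTO public.models (make_id, name)"]
  let lines := lines ++ ["SELECT m.id, v.name FROM (VALUES"]
  let model_vals := models.map (fun p =>
    "  ('" ++ PySem.Str.replace p.1 "'" "''" ++ "', '" ++ PySem.Str.replace p.2 "'" "''" ++ "')")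
  let lines := lines ++ [PySem.Str.join ",\n" model_vals]
  let lines := lines ++ [") AS v(maker_name, name)"]
  let lines := lines ++ ["JOIN makes m ON m.name = v.maker_name"]
  let lines := lines ++ ["ON CONFLICT (name, make_id) DO NOTHING;"]
  let lines := lines ++ [""]
  let lines := lines ++ ["INSERT INTO public.styles (model_id, style_name)"]
  let lines := lines ++ ["SELECT mo.id, v.style_name FROM (VALUES"]
  let style_vals := styles.map (fun t =>
    "  ('" ++ PySem.Str.replace t.1 "'" "''" ++ "', '" ++ PySem.Str.replace t.2.1 "'" "''" ++ "', '" ++ PySem.Str.replace t.2.2 "'" "''" ++ "')")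
  let lines := lines ++ [PySem.Str.join ",\n" style_vals]
  let lines := lines ++ [") AS v(maker_name, model_name, style_name)"]
  let lines := lines ++ ["JOIN makes ma ON ma.name = v.maker_name"]
  let lines := lines ++ ["JOIN models mo ON mo.make_id = ma.id AND mo.name = v.model_name"]
  let lines := lines ++ ["ON CONFLICT (style_name, model_id) DO NOTHING;"]
  let lines := lines ++ [""]
  let lines := lines ++ ["INSERT INTO public.model_years (style_id, year)"]
  let lines := lines ++ ["SELECT st.id, v.year FROM (VALUES"]
  let year_vals := rows.map (fun r =>
    "  ('" ++ PySem.Str.replace r.2.1 "'" "''" ++ "', '" ++ PySem.Str.replace r.2.2.1 "'" "''" ++ "', '" ++ PySem.Str.replace r.2.2.2 "'" "''" ++ "', " ++ PySem.Int.toStr r.1 ++ ")")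
  let lines := lines ++ [PySem.Str.join ",\n" year_vals]
  let lines := lines ++ [") AS v(maker_name, model_name, style_name, year)"]
  let lines := lines ++ ["JOIN makes ma ON ma.name = v.maker_name"]
  let lines := lines ++ ["JOIN models mo ON mo.make_id = ma.id AND mo.name = v.model_name"]
  let lines := lines ++ ["JOIN styles st ON st.model_id = mo.id AND st.style_name = v.style_name"]
  let lines := lines ++ ["ON CONFLICT (year, style_id) DO NOTHING;"]
  PySem.Str.join "\n" lines

-- ===== PORT B =====
def pvEsc (s : String) : String := PySem.Str.replace s "'" "''"
def pvQ (s : String) : String := "'" ++ pvEsc s ++ "'"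
def pvRow (parts : List String) : String := "  (" ++ PySem.Str.join ", " parts ++ ")"

-- one loop iteration of B's single scan: t != prev gates the style append, then the coarser
-- levels are appended only when their projection of prev changes (prev is None at the start)
def pvStep
    (st : Option (String × String × String) × List (String × String × String) ×
          List (String × String) × List String)
    (t : String × String × String) :
    Option (String × String × String) × List (String × String × String) ×
    List (String × String) × List String :=
  match st with
  | (prev, styles, models, makes) =>
    if some t = prev then (prev, styles, models, makes)
    else
      let styles := styles ++ [t]
      let models :=
        match prev with
        | none => models ++ [(t.1, t.2.1)]
        | some p => if (t.1, t.2.1) = (p.1, p.2.1) then models else models ++ [(t.1, t.2.1)]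
      let makes :=
        match prev with
        | none => makes ++ [t.1]
        | some p => if t.1 = p.1 then makes else makes ++ [t.1]
      (some t, styles, models, makes)

def generate_sql_alt (rows : List (Int × String × String × String)) : String :=
  let triples := pySorted3 (rows.map (fun r => (r.2.1, r.2.2.1, r.2.2.2)))
  let st := triples.foldl pvStep (none, [], [], [])
  let styles := st.2.1
  let models := st.2.2.1
  let makes := st.2.2.2
  let prologue : List String := [
    "UPDATE public.listings SET make_id = NULL, model_id = NULL, style_id = NULL, model_year_id = NULL WHERE make_id IS NOT NULL OR model_id IS NOT NULL OR style_id IS NOT NULL OR model_year_id IS NOT NULL;",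
    "TRUNCATE public.model_years, public.styles, public.models, public.makes;",
    ""]
  let makes_block : List String := [
    "INSERT INTO public.makes (name) VALUES",
    PySem.Str.join ",\n" (makes.map (fun m => pvRow [pvQ m])) ++ " ON CONFLICT (name) DO NOTHING;",
    ""]
  let models_block : List String := [
    "INSERT INTO public.models (make_id, name)",
    "SELECT m.id, v.name FROM (VALUES",
    PySem.Str.join ",\n" (models.map (fun p => pvRow [pvQ p.1, pvQ p.2])),
    ") AS v(maker_name, name)",
    "JOIN makes m ON m.name = v.maker_name",
    "ON CONFLICT (name, make_id) DO NOTHING;",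
    ""]
  let styles_block : List String := [
    "INSERT INTO public.styles (model_id, style_name)",
    "SELECT mo.id, v.style_name FROM (VALUES",
    PySem.Str.join ",\n" (styles.map (fun t => pvRow [pvQ t.1, pvQ t.2.1, pvQ t.2.2])),
    ") AS v(maker_name, model_name, style_name)",
    "JOIN makes ma ON ma.name = v.maker_name",
    "JOIN models mo ON mo.make_id = ma.id AND mo.name = v.model_name",
    "ON CONFLICT (style_name, model_id) DO NOTHING;",
    ""]
  let years_block : List String := [
    "INSERT INTO public.model_years (style_id, year)",
    "SELECT st.id, v.year FROM (VALUES",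
    PySem.Str.join ",\n" (rows.map (fun r => pvRow [pvQ r.2.1, pvQ r.2.2.1, pvQ r.2.2.2, PySem.Int.toStr r.1])),
    ") AS v(maker_name, model_name, style_name, year)",
    "JOIN makes ma ON ma.name = v.maker_name",
    "JOIN models mo ON mo.make_id = ma.id AND mo.name = v.model_name",
    "JOIN styles st ON st.model_id = mo.id AND st.style_name = v.style_name",
    "ON CONFLICT (year, style_id) DO NOTHING;"]
  PySem.Str.join "\n" (prologue ++ makes_block ++ models_block ++ styles_block ++ years_block)

-- ===== PRECONDITION & SPEC =====
def Spec_generate_sql (rows : List (Int × String × String × String)) (out : String) : Prop := out = generate_sql_alt rows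
instance (rows : List (Int × String × String × String)) (out : String) : Decidable (Spec_generate_sql rows out) := by unfold Spec_generate_sql; infer_instance

-- ===== CLAIM (what is proved, stated in full; the proofs are below) =====
def Claim_equal_generate_sql : Prop := ∀ (rows : List (Int × String × String × String)), Dom_generate_sql rows → Spec_generate_sql rows (generate_sql rows)

-- ===== LEMMAS AND PROOFS =====

-- adjacent-dedup against a running "previous element" (proof-side model of B's scan)
def pvDD {β : Type} [DecidableEq β] : Option β → List β → List β
  | _, [] => []
  | prev, t :: ts => if some t = prev then pvDD (some t) ts else t :: pvDD (some t) ts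

def pvLastPrev {β : Type} : Option β → List β → Option β
  | prev, [] => prev
  | _, t :: ts => pvLastPrev (some t) ts

theorem pvDD_sublist {β : Type} [DecidableEq β] (prev : Option β) (l : List β) :
    (pvDD prev l).Sublist l := by
  induction l generalizing prev with
  | nil => simp [pvDD]
  | cons t ts ih =>
    simp only [pvDD]
    split_ifs
    · exact (ih (some t)).trans (List.sublist_cons_self t ts)
    · exact (ih (some t)).cons₂ t

theorem pvDD_mem {β : Type} [DecidableEq β] (prev : Option β) (l : List β) (x : β)
    (hx : x ∈ l) : x ∈ pvDD prev l ∨ prev = some x := by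
  induction l generalizing prev with
  | nil => cases hx
  | cons t ts ih =>
    simp only [pvDD]
    rcases List.mem_cons.1 hx with rfl | hx
    · split_ifs with h
      · exact Or.inr h.symm
      · exact Or.inl (List.mem_cons_self)
    · split_ifs with h
      · rcases ih (some t) hx with h' | h'
        · exact Or.inl h'
        · exact Or.inr (h ▸ h')
      · rcases ih (some t) hx with h' | h'
        · exact Or.inl (List.mem_cons_of_mem _ h')
        · exact Or.inl (List.mem_cons.2 (Or.inl (Option.some.inj h').symm))
    
theorem pvDD_mem_iff_none {β : Type} [DecidableEq β] (l : List β) (x : β) :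
    x ∈ pvDD none l ↔ x ∈ l := by
  constructor
  · exact fun h => (pvDD_sublist none l).mem h
  · intro h
    rcases pvDD_mem none l x h with h' | h'
    · exact h'
    · cases h'

theorem pvDD_pairwise_lt {β κ : Type} [DecidableEq β] [LinearOrder κ]
    (key : β → κ) (hinj : Function.Injective key) (l : List β) (prev : Option β)
    (hpw : l.Pairwise (fun a b => key a ≤ key b))
    (hlb : ∀ p, prev = some p → ∀ x ∈ l, key p ≤ key x) :
    (pvDD prev l).Pairwise (fun a b => key a < key b) ∧
      ∀ x ∈ pvDD prev l, ∀ p, prev = some p → key p < key x := by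
  induction l generalizing prev with
  | nil => simp [pvDD]
  | cons t ts ih =>
    rcases List.pairwise_cons.1 hpw with ⟨hts, htl⟩
    simp only [pvDD]
    split_ifs with h
    · obtain ⟨pw, hb⟩ := ih (some t) htl (by intro p hp x hx; exact (Option.some.inj hp) ▸ hts x hx)
      refine ⟨pw, fun x hx p hp => ?_⟩
      have : p = t := by rw [hp] at h; exact (Option.some.injEq _ _ ▸ h).symm
      exact this ▸ hb x hx t rfl
    · obtain ⟨pw, hb⟩ := ih (some t) htl (by intro p hp x hx; exact (Option.some.inj hp) ▸ hts x hx)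
      constructor
      · exact List.pairwise_cons.2 ⟨fun x hx => hb x hx t rfl, pw⟩
      · intro x hx p hp
        have hpt : key p < key t := by
          have hle : key p ≤ key t := hlb p hp t List.mem_cons_self
          have hne : p ≠ t := fun e => h (by rw [hp, e])
          exact lt_of_le_of_ne hle (fun e => hne (hinj e))
        rcases List.mem_cons.1 hx with rfl | hx
        · exact hpt
        · exact hpt.trans (hb x hx t rfl)

theorem pvDD_nodup {β κ : Type} [DecidableEq β] [LinearOrder κ]
    (key : β → κ) (hinj : Function.Injective key) (l : List β)
    (hpw : l.Pairwise (fun a b => key a ≤ key b)) :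
    (pvDD none l).Nodup := by
  have := (pvDD_pairwise_lt key hinj l none hpw (by rintro p ⟨⟩)).1
  exact this.imp (fun h => fun e => absurd (e ▸ h) (lt_irrefl _))

-- sorted(set(M), key) is exactly the adjacent-dedup of any key-nondecreasing list with M's members
theorem pv_sorted_set_eq_dd {β κ : Type} [DecidableEq β] [BEq β] [LawfulBEq β] [LinearOrder κ]
    (key : β → κ) (hinj : Function.Injective key) (L M : List β)
    (hpw : L.Pairwise (fun a b => key a ≤ key b)) (hm : ∀ x, x ∈ M ↔ x ∈ L) :
    PySem.List.sorted (PySem.Set.ofList M) key = pvDD none L := by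
  apply PySem.List.sorted_eq_of_perm_of_pairwise_lt
  · apply List.perm_of_nodup_nodup_toFinset_eq (pvDD_nodup key hinj L hpw)
      (PySem.Set.nodup_ofList M)
    ext x
    simp only [List.mem_toFinset, pvDD_mem_iff_none, PySem.Set.mem_ofList]
    exact (hm x).symm
  · exact (pvDD_pairwise_lt key hinj L none hpw (by rintro p ⟨⟩)).1

-- Python's sorted with a 2-tuple key is sorted with the corresponding lexicographic key
theorem pv_sorted2_eq_sorted_lex {α κ₁ κ₂ : Type} [LinearOrder κ₁] [LinearOrder κ₂]
    (xs : List α) (k1 : α → κ₁) (k2 : α → κ₂) :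
    PySem.List.sorted2 xs k1 k2 = PySem.List.sorted xs (fun x => toLex (k1 x, k2 x)) := by
  have hcmp : (fun a b => decide (k1 a < k1 b) || (!decide (k1 b < k1 a) && decide (k2 a < k2 b)))
      = (fun a b : α => decide ((fun x => toLex (k1 x, k2 x)) a < (fun x => toLex (k1 x, k2 x)) b)) := by
    funext a b
    rw [Bool.eq_iff_iff]
    simp only [Bool.or_eq_true, Bool.and_eq_true, Bool.not_eq_eq_eq_not,
      Bool.not_true, decide_eq_false_iff_not, not_lt, decide_eq_true_eq, Prod.Lex.lt_iff,
      ofLex_toLex]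
    constructor
    · rintro (h | ⟨h1, h2⟩)
      · exact Or.inl h
      · rcases eq_or_lt_of_le h1 with e | hlt
        · exact Or.inr ⟨e, h2⟩
        · exact Or.inl hlt
    · rintro (h | ⟨h1, h2⟩)
      · exact Or.inl h
      · exact Or.inr ⟨le_of_eq h1, h2⟩
  show List.foldl _ [] xs = List.foldl _ [] xs
  rw [show (if (false = true) then _ else fun a b => decide (k1 a < k1 b) || (!decide (k1 b < k1 a) && decide (k2 a < k2 b))) = fun a b => decide (k1 a < k1 b) || (!decide (k1 b < k1 a) && decide (k2 a < k2 b)) from rfl, hcmp]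
  rfl

theorem pvKey3_inj : Function.Injective pvKey3 := by
  intro a b h
  have h' : (a.1, toLex (a.2.1, a.2.2)) = (b.1, toLex (b.2.1, b.2.2)) := toLex.injective h
  have h2 : (a.2.1, a.2.2) = (b.2.1, b.2.2) := toLex.injective (congrArg Prod.snd h')
  exact Prod.ext (congrArg Prod.fst h')
    (Prod.ext (congrArg Prod.fst h2) (congrArg Prod.snd h2))

theorem pvKey2_inj : Function.Injective (fun p : String × String => toLex (p.1, p.2)) := by
  intro a b h
  have h' : (a.1, a.2) = (b.1, b.2) := toLex.injective h
  exact Prod.ext (congrArg Prod.fst h') (congrArg Prod.snd h')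

theorem pv_key3_le_proj2 {a b : String × String × String} (h : pvKey3 a ≤ pvKey3 b) :
    toLex ((a.1, a.2.1).1, (a.1, a.2.1).2) ≤ toLex ((b.1, b.2.1).1, (b.1, b.2.1).2) := by
  simp only [pvKey3, Prod.Lex.le_iff, ofLex_toLex] at *
  rcases h with h | ⟨h1, h2 | ⟨h3, _⟩⟩
  · exact Or.inl h
  · exact Or.inr ⟨h1, le_of_lt h2⟩
  · exact Or.inr ⟨h1, le_of_eq h3⟩

theorem pv_key3_le_proj1 {a b : String × String × String} (h : pvKey3 a ≤ pvKey3 b) :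
    a.1 ≤ b.1 := by
  simp only [pvKey3, Prod.Lex.le_iff, ofLex_toLex] at h
  rcases h with h | ⟨h1, _⟩
  · exact le_of_lt h
  · exact le_of_eq h1

-- B's scan computes the three adjacent-dedups of the sorted triples and their projections
theorem pv_loop_char (l : List (String × String × String)) :
    ∀ (prev : Option (String × String × String)) (s : List (String × String × String))
      (m : List (String × String)) (k : List String),
    List.foldl pvStep (prev, s, m, k) l =
      (pvLastPrev prev l, s ++ pvDD prev l,
        m ++ pvDD (prev.map (fun p => (p.1, p.2.1))) (l.map (fun t => (t.1, t.2.1))),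
        k ++ pvDD (prev.map (fun p => p.1)) (l.map (fun t => t.1))) := by
  induction l with
  | nil => intro prev s m k; simp [pvDD, pvLastPrev]
  | cons t ts ih =>
    intro prev s m k
    rw [List.foldl_cons]
    by_cases h : some t = prev
    · obtain ⟨p, rfl⟩ : ∃ p, prev = some p := ⟨t, h.symm⟩
      have htp : t = p := Option.some.inj h
      subst htp
      have hstep : pvStep (some t, s, m, k) t = (some t, s, m, k) := by simp [pvStep]
      rw [hstep, ih (some t) s m k]
      simp [pvDD, pvLastPrev]
    · cases prev with
      | none =>
        have hstep : pvStep (none, s, m, k) t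
            = (some t, s ++ [t], m ++ [(t.1, t.2.1)], k ++ [t.1]) := by
          simp [pvStep]
        rw [hstep, ih]
        simp [pvDD, pvLastPrev]
      | some p =>
        have hne : ¬ t = p := fun e => h (by rw [e])
        by_cases h2 : (t.1, t.2.1) = (p.1, p.2.1)
        · have h2' := h2
          rw [Prod.mk.injEq] at h2'
          obtain ⟨h1, h3⟩ := h2'
          have hstep : pvStep (some p, s, m, k) t = (some t, s ++ [t], m, k) := by
            simp [pvStep, hne, h1, h3]
          rw [hstep, ih]
          simp [pvDD, pvLastPrev, hne, h1, h3]
        · by_cases h1 : t.1 = p.1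
          · have h3 : ¬ t.2.1 = p.2.1 := fun e => h2 (by rw [Prod.mk.injEq]; exact ⟨h1, e⟩)
            have hstep : pvStep (some p, s, m, k) t
                = (some t, s ++ [t], m ++ [(t.1, t.2.1)], k) := by
              simp [pvStep, hne, h1, h3]
            rw [hstep, ih]
            simp [pvDD, pvLastPrev, hne, h1, h3]
          · have hstep : pvStep (some p, s, m, k) t
                = (some t, s ++ [t], m ++ [(t.1, t.2.1)], k ++ [t.1]) := by
              simp [pvStep, hne, h2, h1]
            rw [hstep, ih]
            simp [pvDD, pvLastPrev, hne, h2, h1]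

-- formatting helpers produce exactly A's formatted rows
theorem pv_row1 (m : String) :
    pvRow [pvQ m] = "  ('" ++ PySem.Str.replace m "'" "''" ++ "')" := by
  apply String.toList_injective
  simp [pvRow, pvQ, pvEsc, PySem.Str.join, PySem.Chars.join, List.intercalate]

theorem pv_row2 (a b : String) :
    pvRow [pvQ a, pvQ b] = "  ('" ++ PySem.Str.replace a "'" "''" ++ "', '" ++ PySem.Str.replace b "'" "''" ++ "')" := by
  apply String.toList_injective
  simp [pvRow, pvQ, pvEsc, PySem.Str.join, PySem.Chars.join, List.intercalate]

theorem pv_row3 (a b c : String) :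
    pvRow [pvQ a, pvQ b, pvQ c] = "  ('" ++ PySem.Str.replace a "'" "''" ++ "', '" ++ PySem.Str.replace b "'" "''" ++ "', '" ++ PySem.Str.replace c "'" "''" ++ "')" := by
  apply String.toList_injective
  simp [pvRow, pvQ, pvEsc, PySem.Str.join, PySem.Chars.join, List.intercalate]

theorem pv_row4 (a b c : String) (y : Int) :
    pvRow [pvQ a, pvQ b, pvQ c, PySem.Int.toStr y] = "  ('" ++ PySem.Str.replace a "'" "''" ++ "', '" ++ PySem.Str.replace b "'" "''" ++ "', '" ++ PySem.Str.replace c "'" "''" ++ "', " ++ PySem.Int.toStr y ++ ")" := by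
  apply String.toList_injective
  simp [pvRow, pvQ, pvEsc, PySem.Str.join, PySem.Chars.join, List.intercalate]

-- the three deduplicated levels agree
theorem pv_styles_eq (rows : List (Int × String × String × String)) :
    pySorted3 (PySem.Set.ofList (rows.map (fun r => (r.2.1, r.2.2.1, r.2.2.2)))) =
      pvDD none (pySorted3 (rows.map (fun r => (r.2.1, r.2.2.1, r.2.2.2)))) := by
  exact pv_sorted_set_eq_dd pvKey3 pvKey3_inj _ _
    (PySem.List.sorted_pairwise _ pvKey3)
    (fun x => (PySem.List.mem_sorted _ pvKey3 false x).symm)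

theorem pv_models_eq (rows : List (Int × String × String × String)) :
    PySem.List.sorted2 (PySem.Set.ofList (rows.map (fun r => (r.2.1, r.2.2.1))))
        (fun x => x.1) (fun x => x.2) =
      pvDD none ((pySorted3 (rows.map (fun r => (r.2.1, r.2.2.1, r.2.2.2)))).map
        (fun t => (t.1, t.2.1))) := by
  rw [pv_sorted2_eq_sorted_lex]
  apply pv_sorted_set_eq_dd (fun p : String × String => toLex (p.1, p.2)) pvKey2_inj
  · exact ((PySem.List.sorted_pairwise _ pvKey3).map _ (fun {a b} h => pv_key3_le_proj2 h))
  · intro x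
    simp only [List.mem_map, PySem.List.mem_sorted, pySorted3]
    constructor
    · rintro ⟨r, hr, rfl⟩; exact ⟨(r.2.1, r.2.2.1, r.2.2.2), ⟨r, hr, rfl⟩, rfl⟩
    · rintro ⟨t, ⟨r, hr, rfl⟩, rfl⟩; exact ⟨r, hr, rfl⟩

theorem pv_makes_eq (rows : List (Int × String × String × String)) :
    PySem.List.sorted (PySem.Set.ofList (rows.map (fun r => r.2.1))) (fun x => x) =
      pvDD none ((pySorted3 (rows.map (fun r => (r.2.1, r.2.2.1, r.2.2.2)))).map
        (fun t => t.1)) := by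
  apply pv_sorted_set_eq_dd (fun x : String => x) (fun _ _ h => h)
  · exact ((PySem.List.sorted_pairwise _ pvKey3).map _ (fun {a b} h => pv_key3_le_proj1 h))
  · intro x
    simp only [List.mem_map, PySem.List.mem_sorted, pySorted3]
    constructor
    · rintro ⟨r, hr, rfl⟩; exact ⟨(r.2.1, r.2.2.1, r.2.2.2), ⟨r, hr, rfl⟩, rfl⟩
    · rintro ⟨t, ⟨r, hr, rfl⟩, rfl⟩; exact ⟨r, hr, rfl⟩

-- ===== VERDICT (by name: the statement is the Claim_ definition above) =====
theorem generate_sql_spec : Claim_equal_generate_sql := by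
  intro rows _
  unfold Spec_generate_sql generate_sql generate_sql_alt
  simp only [pv_loop_char, Option.map_none, List.nil_append, pv_row1, pv_row2, pv_row3, pv_row4]
  rw [pv_styles_eq, pv_models_eq, pv_makes_eq]
  simp only [List.cons_append, List.nil_append]
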